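-- pv_equiv track=rewrite | github.com/milkykittybunny/USACO | bronze/2011_moosick/moosick.py | moosick
-- ===== SOURCE A (Python) =====
-- def transpose(trans):
--     small = trans[0]
--     for y in trans:
--         trans[trans.index(y)] = y - small
--     return trans
--
-- def moosick(lst1, lst2):
--     counter = 0
--     indexes = []
--     cut = len(lst2)
--     d = -1
--     lst2.sort()
--     lst2 = transpose(lst2)
--     for x in range(len(lst1) - len(lst2) + 1):
--         flag = True
--         lst3 = lst1[d + 1:d+cut+1]
--         d+=1
--         lst3.sort()
--         lst3 = transpose(lst3)
--         for i in range(len(lst2)):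
--             if lst2[i] != lst3[i]:
--                 flag = False
--         if flag == True:
--             counter += 1
--             indexes.append(d+1)
--     return counter, indexes
-- ===== SOURCE B (Python) =====
-- import bisect
--
-- def transpose(trans):
--     small = trans[0]
--     for y in trans:
--         trans[trans.index(y)] = y - small
--     return trans
--
-- def moosick(lst1, lst2):
--     # sliding sorted window maintained with bisect instead of re-slicing and
--     # re-sorting every window; transpose kept verbatim (mutates lst2 like A does)
--     lst2.sort()
--     lst2 = transpose(lst2)
--     m = len(lst2)
--     counter = 0
--     indexes = []
--     total = len(lst1) - m + 1
--     if total <= 0: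
--         return counter, indexes
--     sw = sorted(lst1[0:m])
--     for start in range(total):
--         if start > 0:
--             bisect.insort(sw, lst1[start + m - 1])
--             del sw[bisect.bisect_left(sw, lst1[start - 1])]
--         if transpose(sw.copy()) == lst2:
--             counter += 1
--             indexes.append(start + 1)
--     return counter, indexes
-- ===== Notes on version B (the rewrite author's own statement) =====
-- stated objective: alternative
-- what changed: Instead of re-slicing and re-sorting every window, B maintains one sorted sliding window with bisect.insort insertion and bisect_left deletion and compares transpose(copy) to the normalized lst2 by direct list equality; transpose and the in-place mutation of lst2 are kept.
import Mathlib
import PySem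

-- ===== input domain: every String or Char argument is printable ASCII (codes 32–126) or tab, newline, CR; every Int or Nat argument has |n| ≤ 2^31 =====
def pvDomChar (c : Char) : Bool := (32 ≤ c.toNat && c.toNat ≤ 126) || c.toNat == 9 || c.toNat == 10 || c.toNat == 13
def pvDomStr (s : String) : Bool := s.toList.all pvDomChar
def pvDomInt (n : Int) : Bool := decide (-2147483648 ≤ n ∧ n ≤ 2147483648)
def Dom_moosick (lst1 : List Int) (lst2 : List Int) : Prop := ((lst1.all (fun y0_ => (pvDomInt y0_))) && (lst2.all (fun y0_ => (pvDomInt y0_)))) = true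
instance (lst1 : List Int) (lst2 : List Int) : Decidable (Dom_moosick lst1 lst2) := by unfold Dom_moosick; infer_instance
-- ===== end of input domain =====

-- B maintains one sorted sliding window with bisect insertion/removal instead of
-- re-slicing and re-sorting every window (alternative decomposition, same cost:
-- transpose dominates).  NOTE: like A, the Python B sorts and transposes its lst2
-- argument in place; the equivalence proved here is about the return value.


-- ===== PORT A =====
-- transpose(trans): small = trans[0]; for y in trans: trans[trans.index(y)] = y - small.
-- Python's `for y in trans` walks live indices 0..len-1 (length is constant: `set`
-- preserves it); `trans.index(y)` is the first index holding y, always found since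
-- y = trans[k]; only called on non-empty lists (Pre_), so headD's default is never read.
def pyTranspose (trans : List Int) : List Int :=
  let small := trans.headD 0
  (List.range trans.length).foldl
    (fun tr k =>
      let y := tr.getD k 0
      tr.set (tr.idxOf y) (y - small))
    trans

-- the inner `for i in range(len(lst2)): if lst2[i] != lst3[i]: flag = False`
def flagLoop (l2 l3 : List Int) : Bool :=
  (List.range l2.length).foldl (fun f i => if l2.getD i 0 ≠ l3.getD i 0 then false else f) true

-- `for x in range(len(lst1) - len(lst2) + 1)` with state (d, counter, indexes); x unused
def moosickLoop (lst1 l2 : List Int) (cut : Nat) :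
    Nat → Int → Int → List Int → Int × List Int
  | 0, _d, counter, indexes => (counter, indexes)
  | n + 1, d, counter, indexes =>
    let lst3 := PySem.List.slice lst1 (some (d + 1)) (some (d + (cut : Int) + 1))
    let d' := d + 1
    let lst3' := pyTranspose (PySem.List.sorted lst3 (fun x => x) false)
    let flag := flagLoop l2 lst3'
    if flag then moosickLoop lst1 l2 cut n d' (counter + 1) (indexes ++ [d' + 1])
    else moosickLoop lst1 l2 cut n d' counter indexes

def moosick (lst1 : List Int) (lst2 : List Int) : Int × List Int :=
  let cut := lst2.length
  let l2 := pyTranspose (PySem.List.sorted lst2 (fun x => x) false)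
  moosickLoop lst1 l2 cut ((lst1.length : Int) - (l2.length : Int) + 1).toNat (-1) 0 []

-- ===== PORT B =====
-- bisect.insort(sw, x)
def insortB (sw : List Int) (x : Int) : List Int :=
  PySem.List.insert sw ((PySem.List.bisectRight sw x : Nat) : Int) x

-- `for start in range(total)` of Source B, state (start, sw, counter, indexes)
def altLoop (lst1 l2 : List Int) (m : Nat) :
    Nat → Nat → List Int → Int → List Int → Int × List Int
  | 0, _start, _sw, counter, indexes => (counter, indexes)
  | n + 1, start, sw, counter, indexes =>
    let sw' :=
      if start > 0 then
        let sw1 := insortB sw (lst1.getD (start + m - 1) 0)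
        sw1.eraseIdx (PySem.List.bisectLeft sw1 (lst1.getD (start - 1) 0))
      else sw
    if pyTranspose sw' = l2 then
      altLoop lst1 l2 m n (start + 1) sw' (counter + 1) (indexes ++ [(start : Int) + 1])
    else altLoop lst1 l2 m n (start + 1) sw' counter indexes

def moosick_alt (lst1 : List Int) (lst2 : List Int) : Int × List Int :=
  let l2 := pyTranspose (PySem.List.sorted lst2 (fun x => x) false)
  let m := l2.length
  let total : Int := (lst1.length : Int) - (m : Int) + 1
  if total ≤ 0 then (0, [])
  else
    let sw := PySem.List.sorted (PySem.List.slice lst1 (some 0) (some (m : Int))) (fun x => x) false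
    altLoop lst1 l2 m total.toNat 0 sw 0 []

-- ===== PRECONDITION & SPEC =====
-- empty lst2 makes A (and B) raise IndexError at trans[0]
def Pre_moosick (lst1 : List Int) (lst2 : List Int) : Prop := lst2 ≠ []
instance (lst1 : List Int) (lst2 : List Int) : Decidable (Pre_moosick lst1 lst2) := by
  unfold Pre_moosick; infer_instance

def pvWitness_moosick : List Int × List Int := ([1, 2, 3, 4], [2, 3])

def Spec_moosick (lst1 : List Int) (lst2 : List Int) (out : Int × List Int) : Prop := out = moosick_alt lst1 lst2
instance (lst1 : List Int) (lst2 : List Int) (out : Int × List Int) : Decidable (Spec_moosick lst1 lst2 out) := by unfold Spec_moosick; infer_instance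

-- ===== CLAIM (what is proved, stated in full; the proofs are below) =====
def Claim_equal_moosick : Prop := ∀ (lst1 : List Int) (lst2 : List Int), Dom_moosick lst1 lst2 → Pre_moosick lst1 lst2 → Spec_moosick lst1 lst2 (moosick lst1 lst2)

-- ===== LEMMAS AND PROOFS =====

-- the sorted window of width m starting at s
def win (lst1 : List Int) (m s : Nat) : List Int :=
  PySem.List.sorted ((lst1.drop s).take m) (fun x => x) false

theorem foldl_set_length (small : Int) :
    ∀ (l : List Nat) (tr : List Int),
    (l.foldl (fun tr k => let y := tr.getD k 0; tr.set (tr.idxOf y) (y - small)) tr).length = tr.length := by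
  intro l
  induction l with
  | nil => intro tr; rfl
  | cons a l ih => intro tr; rw [List.foldl_cons, ih, List.length_set]

theorem flagLoop_fold_eq (l2 l3 : List Int) (h : l3.length = l2.length) :
    (List.range l2.length).foldl (fun f i => if l2.getD i 0 ≠ l3.getD i 0 then false else f) true = decide (l2 = l3) := by
  have key : ∀ (k : Nat) (b : Bool), (List.range k).foldl (fun f i => if l2.getD i 0 ≠ l3.getD i 0 then false else f) b
      = (b && decide (∀ i < k, l2.getD i 0 = l3.getD i 0)) := by
    intro k
    induction k with
    | zero => simp
    | succ k ih =>
      intro b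
      rw [List.range_succ, List.foldl_append, ih, List.foldl_cons, List.foldl_nil]
      by_cases h1 : l2.getD k 0 = l3.getD k 0
      · rw [if_neg (by simpa using h1)]
        congr 1
        apply decide_eq_decide.mpr
        constructor
        · intro hh i hi
          rcases Nat.lt_succ_iff_lt_or_eq.mp hi with h2 | h2
          · exact hh i h2
          · subst h2; exact h1
        · intro hh i hi; exact hh i (Nat.lt_succ_of_lt hi)
      · rw [if_pos h1, decide_eq_false (by intro hh; exact h1 (hh k (Nat.lt_succ_self k))), Bool.and_false]
  rw [key, Bool.true_and]
  apply decide_eq_decide.mpr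
  constructor
  · intro hh
    apply List.ext_getElem h.symm
    intro i hi1 hi2
    have := hh i hi1
    rwa [List.getD_eq_getElem _ _ hi1, List.getD_eq_getElem _ _ hi2] at this
  · intro hh i hi; rw [hh]

theorem insortB_eq (w : List Int) (x : Int) (hp : w.Pairwise (· ≤ ·)) :
    insortB w x = w.take (PySem.List.bisectRight w x) ++ x :: w.drop (PySem.List.bisectRight w x) := by
  unfold insortB
  exact PySem.List.insert_natCast _ _ _ (PySem.List.bisectRight_spec w x hp).1

theorem insortB_perm (w : List Int) (x : Int) (hp : w.Pairwise (· ≤ ·)) :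
    (insortB w x).Perm (x :: w) := by
  rw [insortB_eq w x hp]
  calc (w.take _ ++ x :: w.drop _).Perm (x :: (w.take _ ++ w.drop _)) := List.perm_middle
    _ = (x :: w) := by rw [List.take_append_drop]

theorem insortB_pairwise (w : List Int) (x : Int) (hp : w.Pairwise (· ≤ ·)) :
    (insortB w x).Pairwise (· ≤ ·) := by
  rw [insortB_eq w x hp]
  obtain ⟨hle, hlt, hge⟩ := PySem.List.bisectRight_spec w x hp
  have hpg := List.pairwise_iff_getElem.mp hp
  rw [List.pairwise_append]
  refine ⟨hp.sublist (List.take_sublist _ _), ?_, ?_⟩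
  · rw [List.pairwise_cons]
    refine ⟨?_, hp.sublist (List.drop_sublist _ _)⟩
    intro b hb
    obtain ⟨i, hi, rfl⟩ := List.getElem_of_mem hb
    rw [List.getElem_drop]
    exact le_of_lt (hge _ _ (Nat.le_add_right _ _))
  · intro a ha b hb
    obtain ⟨i, hi, rfl⟩ := List.getElem_of_mem ha
    have hi2 : i < PySem.List.bisectRight w x ∧ i < w.length := by
      rw [List.length_take] at hi; omega
    have hax : (w.take (PySem.List.bisectRight w x))[i] ≤ x := by
      rw [List.getElem_take]; exact hlt i hi2.2 hi2.1
    rcases List.mem_cons.mp hb with rfl | hb2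
    · exact hax
    · obtain ⟨j, hj, rfl⟩ := List.getElem_of_mem hb2
      rw [List.getElem_drop]
      exact le_trans hax (le_of_lt (hge _ _ (Nat.le_add_right _ _)))

theorem eraseBL (l : List Int) (v : Int) (hp : l.Pairwise (· ≤ ·)) (hv : v ∈ l) :
    (v :: l.eraseIdx (PySem.List.bisectLeft l v)).Perm l ∧
    (l.eraseIdx (PySem.List.bisectLeft l v)).Pairwise (· ≤ ·) := by
  obtain ⟨hle, hlt, hge⟩ := PySem.List.bisectLeft_spec l v hp
  obtain ⟨t, ht, rfl⟩ := List.getElem_of_mem hv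
  have hpg := List.pairwise_iff_getElem.mp hp
  have hi : PySem.List.bisectLeft l l[t] < l.length := by
    rcases Nat.lt_or_ge (PySem.List.bisectLeft l l[t]) l.length with h | h
    · exact h
    · exact absurd (hlt t ht (by omega)) (lt_irrefl _)
  have hit : PySem.List.bisectLeft l l[t] ≤ t := by
    by_contra hc
    exact absurd (hlt t ht (by omega)) (lt_irrefl _)
  have heq : l[PySem.List.bisectLeft l l[t]]'hi = l[t] := by
    rcases Nat.eq_or_lt_of_le hit with h | h
    · simp [h]
    · exact le_antisymm (hpg _ t hi ht h) (hge _ hi (le_refl _))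
  constructor
  · have hsplit : l.eraseIdx (PySem.List.bisectLeft l l[t])
        = l.take (PySem.List.bisectLeft l l[t]) ++ l.drop (PySem.List.bisectLeft l l[t] + 1) := by
      exact List.eraseIdx_eq_take_drop_succ l _
    rw [hsplit]
    have : l = l.take (PySem.List.bisectLeft l l[t]) ++ l[t] :: l.drop (PySem.List.bisectLeft l l[t] + 1) := by
      conv_lhs => rw [← List.take_append_drop (PySem.List.bisectLeft l l[t]) l]
      rw [List.drop_eq_getElem_cons hi, heq]
    conv_rhs => rw [this]
    exact List.perm_middle.symm
  · exact hp.sublist (List.eraseIdx_sublist l _)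

theorem slide_win (lst1 : List Int) (m s : Nat) (hm : 1 ≤ m) (hs : 1 ≤ s)
    (hlen : s + m ≤ lst1.length) :
    (insortB (win lst1 m (s - 1)) (lst1.getD (s + m - 1) 0)).eraseIdx
        (PySem.List.bisectLeft (insortB (win lst1 m (s - 1)) (lst1.getD (s + m - 1) 0))
          (lst1.getD (s - 1) 0))
      = win lst1 m s := by
  obtain ⟨m', rfl⟩ : ∃ m', m = m' + 1 := ⟨m - 1, by omega⟩
  obtain ⟨s', rfl⟩ : ∃ s', s = s' + 1 := ⟨s - 1, by omega⟩
  simp only [Nat.add_sub_cancel]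
  have hs1 : s' < lst1.length := by omega
  have hsm : s' + 1 + m' < lst1.length := by omega
  have hsm' : s' + 1 + (m' + 1) - 1 = s' + 1 + m' := by omega
  rw [hsm', List.getD_eq_getElem lst1 0 hsm, List.getD_eq_getElem lst1 0 hs1]
  set x := lst1[s' + 1 + m'] with hxdef
  set v := lst1[s'] with hvdef
  set w := win lst1 (m' + 1) s' with hw
  have hwp : w.Pairwise (· ≤ ·) := PySem.List.sorted_pairwise _ _
  have hwperm : w.Perm ((lst1.drop s').take (m' + 1)) := PySem.List.sorted_perm _ _ _
  have hdrop : lst1.drop s' = v :: lst1.drop (s' + 1) := List.drop_eq_getElem_cons hs1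
  have hwin1 : (lst1.drop s').take (m' + 1) = v :: (lst1.drop (s' + 1)).take m' := by
    rw [hdrop, List.take_succ_cons]
  have hwin2 : (lst1.drop (s' + 1)).take (m' + 1) = (lst1.drop (s' + 1)).take m' ++ [x] := by
    rw [List.take_add_one]
    congr 1
    have hj : m' < (lst1.drop (s' + 1)).length := by rw [List.length_drop]; omega
    rw [List.getElem?_eq_getElem hj, List.getElem_drop]
    simp only [Option.toList_some, List.cons.injEq, and_true]
    rw [hxdef]
  have h1 : (insortB w x).Perm (x :: w) := insortB_perm w x hwp
  have h1p : (insortB w x).Pairwise (· ≤ ·) := insortB_pairwise w x hwp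
  have hvmem : v ∈ insortB w x := by
    apply h1.mem_iff.mpr
    apply List.mem_cons_of_mem
    apply hwperm.mem_iff.mpr
    rw [hwin1]; exact List.mem_cons_self
  obtain ⟨h2, h2p⟩ := eraseBL (insortB w x) v h1p hvmem
  have h3 : ((insortB w x).eraseIdx (PySem.List.bisectLeft (insortB w x) v)).Perm
      ((lst1.drop (s' + 1)).take (m' + 1)) := by
    have hA : (v :: (insortB w x).eraseIdx (PySem.List.bisectLeft (insortB w x) v)).Perm
        (v :: (x :: (lst1.drop (s' + 1)).take m')) := by
      calc (v :: (insortB w x).eraseIdx _).Perm (insortB w x) := h2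
        _ |>.Perm (x :: w) := h1
        _ |>.Perm (x :: (lst1.drop s').take (m' + 1)) := hwperm.cons x
        _ = (x :: (v :: (lst1.drop (s' + 1)).take m')) := by rw [hwin1]
        _ |>.Perm (v :: (x :: (lst1.drop (s' + 1)).take m')) := List.Perm.swap _ _ _
    rw [hwin2]
    calc ((insortB w x).eraseIdx _).Perm (x :: (lst1.drop (s' + 1)).take m') := hA.cons_inv
      _ |>.Perm ((lst1.drop (s' + 1)).take m' ++ [x]) := by
          simpa using (List.perm_middle (l₁ := (lst1.drop (s' + 1)).take m') (l₂ := []) (a := x)).symm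
  rw [win]
  exact (PySem.List.sorted_id_eq_of_perm_of_pairwise _ _ h3 h2p).symm

theorem length_pyTranspose (tr : List Int) : (pyTranspose tr).length = tr.length := by
  unfold pyTranspose
  exact foldl_set_length _ _ _

theorem flagLoop_eq (l2 l3 : List Int) (h : l3.length = l2.length) :
    flagLoop l2 l3 = decide (l2 = l3) := flagLoop_fold_eq l2 l3 h

theorem loops_eq (lst1 l2 : List Int) (m : Nat) (hm : 1 ≤ m) (hml : l2.length = m) :
    ∀ (n s : Nat) (c : Int) (idx : List Int), s + n + m ≤ lst1.length + 1 →
    moosickLoop lst1 l2 m n ((s : Int) - 1) c idx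
      = altLoop lst1 l2 m n s (win lst1 m (s - 1)) c idx := by
  intro n
  induction n with
  | zero => intro s c idx _; rfl
  | succ n ih =>
    intro s c idx h
    have hsm : s + m ≤ lst1.length := by omega
    have e1 : ((s : Int) - 1 + 1) = ((s : Nat) : Int) := by ring
    have e2 : ((s : Int) - 1 + (m : Int) + 1) = ((s : Nat) : Int) + ((m : Nat) : Int) := by ring
    have hslice : PySem.List.slice lst1 (some ((s : Int) - 1 + 1))
        (some ((s : Int) - 1 + (m : Int) + 1)) = (lst1.drop s).take m := by
      rw [e1, e2, PySem.List.slice_natCast_add]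
    have hwin : PySem.List.sorted (PySem.List.slice lst1 (some ((s : Int) - 1 + 1))
        (some ((s : Int) - 1 + (m : Int) + 1))) (fun x => x) false = win lst1 m s := by
      rw [hslice]; rfl
    have hlen3 : (pyTranspose (win lst1 m s)).length = l2.length := by
      rw [length_pyTranspose, win, PySem.List.length_sorted, List.length_take,
        List.length_drop, hml]
      omega
    have hflag : flagLoop l2 (pyTranspose (win lst1 m s))
        = decide (l2 = pyTranspose (win lst1 m s)) := flagLoop_eq _ _ hlen3
    have hsw : (if s > 0 then
          (insortB (win lst1 m (s - 1)) (lst1.getD (s + m - 1) 0)).eraseIdx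
            (PySem.List.bisectLeft (insortB (win lst1 m (s - 1)) (lst1.getD (s + m - 1) 0))
              (lst1.getD (s - 1) 0))
        else win lst1 m (s - 1)) = win lst1 m s := by
      by_cases hs : s > 0
      · rw [if_pos hs]; exact slide_win lst1 m s hm hs hsm
      · rw [if_neg hs]
        have : s = 0 := by omega
        subst this; rfl
    show moosickLoop lst1 l2 m (n + 1) ((s : Int) - 1) c idx
      = altLoop lst1 l2 m (n + 1) s (win lst1 m (s - 1)) c idx
    rw [moosickLoop, altLoop]
    simp only [hwin, hflag, hsw]
    have ed : (s : Int) - 1 + 1 = ((s + 1 : Nat) : Int) - 1 := by push_cast; ring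
    have hih := fun c idx => ih (s + 1) c idx (by omega)
    rw [Nat.add_sub_cancel] at hih
    by_cases hc : l2 = pyTranspose (win lst1 m s)
    · have e3 : ((s + 1 : Nat) : Int) - 1 + 1 = (s : Int) + 1 := by push_cast; ring
      rw [if_pos (by simp [hc]), if_pos hc.symm, ed, e3, hih]
    · rw [if_neg (by simp [hc]), if_neg (fun hh => hc hh.symm), ed, hih]

-- ===== VERDICT (by name: the statement is the Claim_ definition above) =====
theorem moosick_spec : Claim_equal_moosick := by
  intro lst1 lst2 _hdom hpre
  unfold Spec_moosick moosick moosick_alt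
  have hm : 1 ≤ lst2.length := by
    cases lst2 with
    | nil => exact absurd rfl hpre
    | cons a t => simp
  have hml : (pyTranspose (PySem.List.sorted lst2 (fun x => x) false)).length = lst2.length := by
    rw [length_pyTranspose, PySem.List.length_sorted]
  simp only [hml]
  set l2 := pyTranspose (PySem.List.sorted lst2 (fun x => x) false) with hl2
  by_cases htot : ((lst1.length : Int) - (lst2.length : Int) + 1) ≤ 0
  · rw [if_pos htot]
    have : ((lst1.length : Int) - (lst2.length : Int) + 1).toNat = 0 := by omega
    rw [this]
    rfl
  · rw [if_neg htot]
    have h0 : PySem.List.sorted (PySem.List.slice lst1 (some 0) (some (lst2.length : Int)))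
        (fun x => x) false = win lst1 lst2.length 0 := by
      rw [win, PySem.List.slice_zero_start, PySem.List.slice_to_natCast, List.drop_zero]
    have hmain := loops_eq lst1 l2 lst2.length hm (by rw [hl2, hml])
        (((lst1.length : Int) - (lst2.length : Int) + 1).toNat) 0 0 [] (by omega)
    simp only [Nat.cast_zero] at hmain
    rw [h0]
    have hneg : ((0 : Int) - 1) = (-1 : Int) := by norm_num
    rw [hneg] at hmain
    exact hmain
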